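-- pv_equiv track=rewrite | github.com/miliar/Code_Jam_Webscraper | Solutions_python/Problem_178/766.py | countFlips
-- ===== SOURCE A (Python) =====
-- def countFlips(line):
--     numFlips = 0
--     line = [c for c in line if c == "+" or c == "-"]
--     for i in range(len(line)-1):
--         if line[i] == "+" and line[i+1] == "-": numFlips += 1
--         elif line[i] == "-" and line[i+1] == "+": numFlips += 1
--     if line[-1] == "-": numFlips += 1
--     return numFlips
-- ===== SOURCE B (Python) =====
-- def countFlips(line):
--     # Count maximal runs of '-' instead of pairwise transitions:
--     # answer = 2 * (number of maximal '-' runs) - (1 if the first sign is '-' else 0).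
--     filtered = [c for c in line if c == "+" or c == "-"]
--     runs = 0
--     prev = "+"
--     for c in filtered:
--         if c == "-" and prev == "+":
--             runs += 1
--         prev = c
--     return 2 * runs - (1 if filtered[0] == "-" else 0)
-- ===== Notes on version B (the rewrite author's own statement) =====
-- stated objective: alternative
-- what changed: B makes one pass that counts maximal runs of minus signs among the filtered sign characters and returns twice that count, minus one when the leading sign is a minus, instead of A's pairwise adjacent-index transition count plus trailing-minus test.
import Mathlib
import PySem

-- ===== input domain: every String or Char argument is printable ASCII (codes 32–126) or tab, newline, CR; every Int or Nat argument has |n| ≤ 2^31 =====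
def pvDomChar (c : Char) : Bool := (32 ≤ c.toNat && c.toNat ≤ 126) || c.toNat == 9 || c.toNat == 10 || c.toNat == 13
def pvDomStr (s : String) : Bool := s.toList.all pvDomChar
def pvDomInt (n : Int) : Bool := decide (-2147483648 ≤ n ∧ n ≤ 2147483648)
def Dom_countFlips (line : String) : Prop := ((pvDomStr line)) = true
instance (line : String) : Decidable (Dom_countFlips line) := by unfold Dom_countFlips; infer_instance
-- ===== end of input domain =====

-- B counts maximal '-' runs in one pass (answer = 2*runs - [first sign is '-'])
-- instead of A's pairwise index comparisons; objective: alternative (same cost).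

-- ===== PORT A =====
def countFlips (line : String) : Int :=
  let l := line.toList.filter (fun c => c == '+' || c == '-')
  let numFlips : Int := (PySem.List.pyRange 0 (PySem.List.len l - 1) 1).foldl
    (fun acc i =>
      if PySem.List.pyGetD l i ' ' == '+' && PySem.List.pyGetD l (i + 1) ' ' == '-' then acc + 1
      else if PySem.List.pyGetD l i ' ' == '-' && PySem.List.pyGetD l (i + 1) ' ' == '+' then acc + 1
      else acc) 0
  if PySem.List.pyGetD l (-1) ' ' == '-' then numFlips + 1 else numFlips

-- ===== PORT B =====
def countFlips_alt (line : String) : Int :=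
  let l := line.toList.filter (fun c => c == '+' || c == '-')
  let st := l.foldl
    (fun (s : Int × Char) c => if c == '-' && s.2 == '+' then (s.1 + 1, c) else (s.1, c))
    (0, '+')
  2 * st.1 - (if PySem.List.pyGetD l 0 ' ' == '-' then 1 else 0)

-- ===== PRECONDITION & SPEC =====
-- Pre_ excludes exactly the lines with no '+' or '-' at all: there the filtered list is
-- empty and BOTH Pythons raise IndexError (A on line[-1], B on filtered[0]).
def Pre_countFlips (line : String) : Prop :=
  line.toList.any (fun c => c == '+' || c == '-') = true
instance (line : String) : Decidable (Pre_countFlips line) := by unfold Pre_countFlips; infer_instance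
def pvWitness_countFlips : String := "--+"

def Spec_countFlips (line : String) (out : Int) : Prop := out = countFlips_alt line
instance (line : String) (out : Int) : Decidable (Spec_countFlips line out) := by unfold Spec_countFlips; infer_instance

-- ===== CLAIM (what is proved, stated in full; the proofs are below) =====
def Claim_equal_countFlips : Prop := ∀ (line : String), Dom_countFlips line → Pre_countFlips line → Spec_countFlips line (countFlips line)

-- ===== LEMMAS AND PROOFS =====

-- pairwise transition count (proof-only characterisation of A's loop)
def pvTrans : List Char → Int
  | a :: b :: t => (if (a == '+' && b == '-') || (a == '-' && b == '+') then 1 else 0) + pvTrans (b :: t)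
  | _ => 0

-- B's run counter with explicit previous character (structural form of B's fold)
def pvG : Char → List Char → Int
  | _, [] => 0
  | p, c :: t => (if c == '-' && p == '+' then 1 else 0) + pvG c t

theorem pvG_acc (l : List Char) (r : Int) (p : Char) :
    (l.foldl (fun (s : Int × Char) c => if c == '-' && s.2 == '+' then (s.1 + 1, c) else (s.1, c)) (r, p)).1
      = r + pvG p l := by
  induction l generalizing r p with
  | nil => simp [pvG]
  | cons c t ih =>
    simp only [List.foldl_cons]
    by_cases h : (c == '-' && p == '+') = true
    · rw [if_pos h, ih, pvG, if_pos h]; ring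
    · rw [if_neg h, ih, pvG, if_neg h]; ring

-- A's loop equals the structural pairwise transition count
theorem pvA_loop_eq (l : List Char) :
    (PySem.List.pyRange 0 (PySem.List.len l - 1) 1).foldl
      (fun acc i =>
        if PySem.List.pyGetD l i ' ' == '+' && PySem.List.pyGetD l (i + 1) ' ' == '-' then acc + 1
        else if PySem.List.pyGetD l i ' ' == '-' && PySem.List.pyGetD l (i + 1) ' ' == '+' then acc + 1
        else acc) 0 = pvTrans l := by
  have hfun : (fun (acc : Int) i =>
      if PySem.List.pyGetD l i ' ' == '+' && PySem.List.pyGetD l (i + 1) ' ' == '-' then acc + 1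
      else if PySem.List.pyGetD l i ' ' == '-' && PySem.List.pyGetD l (i + 1) ' ' == '+' then acc + 1
      else acc)
    = (fun (acc : Int) i =>
      if (PySem.List.pyGetD l i ' ' == '+' && PySem.List.pyGetD l (i + 1) ' ' == '-')
          || (PySem.List.pyGetD l i ' ' == '-' && PySem.List.pyGetD l (i + 1) ' ' == '+') then acc + 1
      else acc) := by
    funext acc i
    by_cases h1 : (PySem.List.pyGetD l i ' ' == '+' && PySem.List.pyGetD l (i + 1) ' ' == '-') = true <;>
      by_cases h2 : (PySem.List.pyGetD l i ' ' == '-' && PySem.List.pyGetD l (i + 1) ' ' == '+') = true <;>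
      simp [h1, h2]
  rw [hfun, PySem.List.foldl_if_add_one]
  simp only [zero_add]
  clear hfun
  induction l with
  | nil =>
    rw [PySem.List.pyRange_one_eq_nil (by simp [PySem.List.len_eq])]
    simp [pvTrans]
  | cons a t ih =>
    cases t with
    | nil =>
      rw [PySem.List.pyRange_one_eq_nil (by simp [PySem.List.len_eq])]
      simp [pvTrans]
    | cons b t' =>
      have hlen : PySem.List.len (a :: b :: t') - 1 = PySem.List.len (b :: t') := by
        simp only [PySem.List.len_eq, List.length_cons]
        push_cast
        ring
      have hsplit : PySem.List.pyRange 0 (PySem.List.len (a :: b :: t') - 1) 1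
          = 0 :: PySem.List.pyRange 1 (PySem.List.len (b :: t')) 1 := by
        rw [hlen, PySem.List.pyRange_one_cons (by simp only [PySem.List.len_eq, List.length_cons]; omega)]
        norm_num
      rw [hsplit]
      simp only [List.countP_cons]
      have h0 : PySem.List.pyGetD (a :: b :: t') (0 : Int) ' ' = a := by
        simp [PySem.List.pyGetD_zero_cons]
      have h1 : PySem.List.pyGetD (a :: b :: t') (1 : Int) ' ' = b := by
        rw [show (1 : Int) = ((1 : Nat) : Int) by norm_num, PySem.List.pyGetD_natCast]
        rfl
      -- shift the remaining range: indices 1.. over (a::b::t') are indices 0.. over (b::t')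
      have hshift : (PySem.List.pyRange 1 (PySem.List.len (b :: t')) 1).countP
            (fun i => (PySem.List.pyGetD (a :: b :: t') i ' ' == '+' && PySem.List.pyGetD (a :: b :: t') (i + 1) ' ' == '-')
              || (PySem.List.pyGetD (a :: b :: t') i ' ' == '-' && PySem.List.pyGetD (a :: b :: t') (i + 1) ' ' == '+'))
          = (PySem.List.pyRange 0 (PySem.List.len (b :: t') - 1) 1).countP
            (fun i => (PySem.List.pyGetD (b :: t') i ' ' == '+' && PySem.List.pyGetD (b :: t') (i + 1) ' ' == '-')
              || (PySem.List.pyGetD (b :: t') i ' ' == '-' && PySem.List.pyGetD (b :: t') (i + 1) ' ' == '+')) := by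
        have hmap : PySem.List.pyRange 1 (PySem.List.len (b :: t')) 1
            = (PySem.List.pyRange 0 (PySem.List.len (b :: t') - 1) 1).map (fun i => i + 1) := by
          simp [PySem.List.pyRange_one, PySem.List.len_eq]
          intro k _
          omega
        rw [hmap, List.countP_map]
        apply List.countP_congr
        intro i hi
        have hi' : 0 ≤ i := by
          have := (PySem.List.mem_pyRange_one).1 hi
          omega
        obtain ⟨n, rfl⟩ : ∃ n : Nat, i = (n : Int) := ⟨i.toNat, (Int.toNat_of_nonneg hi').symm⟩
        simp only [Function.comp_apply]
        have g1 : PySem.List.pyGetD (a :: b :: t') ((n : Int) + 1) ' ' = (b :: t').getD n ' ' := by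
          rw [show ((n : Int) + 1) = (((n + 1 : Nat)) : Int) by push_cast; ring, PySem.List.pyGetD_natCast]
          simp [List.getD_cons_succ]
        have g2 : PySem.List.pyGetD (a :: b :: t') ((n : Int) + 1 + 1) ' ' = (b :: t').getD (n + 1) ' ' := by
          rw [show ((n : Int) + 1 + 1) = (((n + 2 : Nat)) : Int) by push_cast; ring, PySem.List.pyGetD_natCast]
          simp [List.getD_cons_succ]
        have g3 : PySem.List.pyGetD (b :: t') ((n : Int)) ' ' = (b :: t').getD n ' ' := by
          rw [PySem.List.pyGetD_natCast]
        have g4 : PySem.List.pyGetD (b :: t') ((n : Int) + 1) ' ' = (b :: t').getD (n + 1) ' ' := by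
          rw [show ((n : Int) + 1) = (((n + 1 : Nat)) : Int) by push_cast; ring, PySem.List.pyGetD_natCast]
        rw [g1, g2, g3, g4]
      rw [hshift]
      push_cast
      rw [ih]
      simp only [pvTrans]
      rw [h0, h1]
      split_ifs <;> ring

-- the core identity: for a nonempty ± list, transitions + trailing-minus = 2*runs - leading-minus
theorem pvMain (l : List Char) (hpm : ∀ c ∈ l, c = '+' ∨ c = '-') (hne : l ≠ []) :
    pvTrans l + (if l.getLast hne == '-' then 1 else 0)
      = 2 * pvG '+' l - (if l.head hne == '-' then 1 else 0) := by
  induction l with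
  | nil => exact absurd rfl hne
  | cons a t ih =>
    cases t with
    | nil =>
      have ha := hpm a (by simp)
      rcases ha with h | h <;> subst h <;> simp [pvTrans, pvG]
    | cons b t' =>
      have hne' : b :: t' ≠ [] := by simp
      have ih' := ih (fun c hc => hpm c (List.mem_cons_of_mem _ hc)) hne'
      have ha := hpm a (by simp)
      have hb := hpm b (by simp)
      have hlast : (a :: b :: t').getLast (by simp) = (b :: t').getLast hne' := rfl
      simp only [pvTrans, pvG] at *
      rw [hlast]
      simp only [List.head_cons] at *
      rcases ha with h | h <;> rcases hb with h2 | h2 <;> subst h <;> subst h2 <;>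
        · simp only [show (('+' : Char) == '-') = false from rfl,
            show (('-' : Char) == '-') = true from rfl, show (('+' : Char) == '+') = true from rfl,
            show (('-' : Char) == '+') = false from rfl, Bool.and_self, Bool.false_and, Bool.and_false,
            Bool.and_true, Bool.true_and, Bool.false_or, Bool.or_false, Bool.true_or, Bool.or_true,
            Bool.false_eq_true, eq_self_iff_true, if_true, if_false] at ih' ⊢
          split_ifs at ih' ⊢ <;> linarith

theorem pvHead (xs : List Char) (h : xs ≠ []) : PySem.List.pyGetD xs (0 : Int) ' ' = xs.head h := by
  cases xs with
  | nil => exact absurd rfl h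
  | cons x t => simp [PySem.List.pyGetD_zero_cons]

theorem pvFilter_pm (line : String) (c : Char)
    (hc : c ∈ line.toList.filter (fun c => c == '+' || c == '-')) : c = '+' ∨ c = '-' := by
  have := List.of_mem_filter hc
  simp at this
  rcases this with h | h <;> [left; right] <;> exact h

theorem pvFilter_ne_nil (line : String) (h : Pre_countFlips line) :
    line.toList.filter (fun c => c == '+' || c == '-') ≠ [] := by
  unfold Pre_countFlips at h
  intro hnil
  rw [List.filter_eq_nil_iff] at hnil
  rw [List.any_eq_true] at h
  obtain ⟨c, hc, hpc⟩ := h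
  exact absurd hpc (by simpa using hnil c hc)

-- ===== VERDICT (by name: the statement is the Claim_ definition above) =====
theorem countFlips_spec : Claim_equal_countFlips := by
  intro line _ hpre
  unfold Spec_countFlips countFlips countFlips_alt
  dsimp only
  set l := line.toList.filter (fun c => c == '+' || c == '-') with hl
  have hne : l ≠ [] := pvFilter_ne_nil line hpre
  have hpm : ∀ c ∈ l, c = '+' ∨ c = '-' := fun c hc => pvFilter_pm line c hc
  rw [pvA_loop_eq]
  rw [show (l.foldl (fun (s : Int × Char) c => if c == '-' && s.2 == '+' then (s.1 + 1, c) else (s.1, c)) (0, '+')).1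
      = pvG '+' l from by rw [pvG_acc]; ring]
  have hlast : PySem.List.pyGetD l (-1) ' ' = l.getLast hne := PySem.List.pyGetD_neg_one l ' ' hne
  have hhead : PySem.List.pyGetD l (0 : Int) ' ' = l.head hne := pvHead l hne
  rw [hlast, hhead]
  have hmain := pvMain l hpm hne
  split_ifs at hmain ⊢ <;> linarith
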